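-- pv_equiv track=rewrite | github.com/kevinhikali/scot | dataset/visualwebarena/vwa_tester.py | __find_last_ob
-- ===== SOURCE A (Python) =====
-- def __find_last_ob(lst):
--     result = None
--     i = len(lst)
--     for d in reversed(lst):
--         i -= 1
--         for key in d.keys():
--             if "observation" in key:
--                 result = d
--                 break
--         if result is not None:
--             break
--     return i
-- ===== SOURCE B (Python) =====
-- def __find_last_ob(lst):
--     result = 0
--     for i, d in enumerate(lst):
--         if any("observation" in key for key in d.keys()):
--             result = i
--     return result
-- ===== Notes on version B (the rewrite author's own statement) =====
-- stated objective: idiomatic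
-- what changed: Replaced the reversed early-stop scan with manual index bookkeeping by a forward enumerate pass with any() that records the last matching index (default 0).
import Mathlib
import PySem

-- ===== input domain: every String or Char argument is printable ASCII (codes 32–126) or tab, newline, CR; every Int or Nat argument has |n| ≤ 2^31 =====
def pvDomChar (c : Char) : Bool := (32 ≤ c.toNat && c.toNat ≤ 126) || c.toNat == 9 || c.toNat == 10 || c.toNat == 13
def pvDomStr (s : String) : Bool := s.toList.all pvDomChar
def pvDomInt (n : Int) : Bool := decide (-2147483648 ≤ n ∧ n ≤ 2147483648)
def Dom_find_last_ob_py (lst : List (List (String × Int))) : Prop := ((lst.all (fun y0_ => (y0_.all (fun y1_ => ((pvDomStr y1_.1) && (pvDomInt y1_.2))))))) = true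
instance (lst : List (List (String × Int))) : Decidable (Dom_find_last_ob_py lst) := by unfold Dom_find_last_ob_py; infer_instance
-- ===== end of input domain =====

-- B replaces A's reversed early-stop scan (manual index counter) with a forward enumerate
-- pass recording the last matching index; objective: idiomatic, same cost.


-- ===== PORT A =====
-- inner 'for key in d.keys(): if "observation" in key: result = d; break' — result set iff some key matches
def pvHasObKey (d : List (String × Int)) : Bool :=
  (d.map Prod.fst).any (fun k => PySem.Str.isIn "observation" k)

-- 'for d in reversed(lst): i -= 1; …; if result is not None: break'
def pvFindLastGo (rev : List (List (String × Int))) (i : Int) : Int :=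
  match rev with
  | [] => i
  | d :: rest =>
    let i := i - 1
    if pvHasObKey d then i else pvFindLastGo rest i

def find_last_ob_py (lst : List (List (String × Int))) : Int :=
  pvFindLastGo lst.reverse (lst.length : Int)

-- ===== PORT B =====
def find_last_ob_py_alt (lst : List (List (String × Int))) : Int :=
  (PySem.List.enumerate lst).foldl
    (fun result p => if (p.2.map Prod.fst).any (fun k => PySem.Str.isIn "observation" k) then p.1 else result) 0

-- ===== PRECONDITION & SPEC =====
def Spec_find_last_ob_py (lst : List (List (String × Int))) (out : Int) : Prop := out = find_last_ob_py_alt lst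
instance (lst : List (List (String × Int))) (out : Int) : Decidable (Spec_find_last_ob_py lst out) := by unfold Spec_find_last_ob_py; infer_instance

-- ===== CLAIM (what is proved, stated in full; the proofs are below) =====
def Claim_equal_find_last_ob_py : Prop := ∀ (lst : List (List (String × Int))), Dom_find_last_ob_py lst → Spec_find_last_ob_py lst (find_last_ob_py lst)

-- ===== LEMMAS AND PROOFS =====

theorem pvAlt_append (xs : List (List (String × Int))) (d : List (String × Int)) :
    find_last_ob_py_alt (xs ++ [d]) =
      (if pvHasObKey d then (xs.length : Int) else find_last_ob_py_alt xs) := by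
  unfold find_last_ob_py_alt
  rw [PySem.List.enumerate_append, List.foldl_append]
  simp [PySem.List.enumerate, pvHasObKey, List.any_map, Function.comp]

theorem pvGo_cons (d : List (String × Int)) (rest : List (List (String × Int))) (i : Int) :
    pvFindLastGo (d :: rest) i = if pvHasObKey d then i - 1 else pvFindLastGo rest (i - 1) := rfl

theorem pvA_append (xs : List (List (String × Int))) (d : List (String × Int)) :
    find_last_ob_py (xs ++ [d]) =
      (if pvHasObKey d then (xs.length : Int) else find_last_ob_py xs) := by
  unfold find_last_ob_py
  simp only [List.reverse_append, List.reverse_cons, List.reverse_nil, List.nil_append,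
    List.cons_append, List.length_append, List.length_cons, List.length_nil]
  rw [pvGo_cons]
  have h1 : ((xs.length + 1 : Nat) : Int) - 1 = (xs.length : Int) := by push_cast; ring
  rw [h1]

theorem pv_eq (lst : List (List (String × Int))) :
    find_last_ob_py lst = find_last_ob_py_alt lst := by
  induction lst using List.reverseRecOn with
  | nil => rfl
  | append_singleton xs d ih =>
    rw [pvA_append, pvAlt_append, ih]

-- ===== VERDICT (by name: the statement is the Claim_ definition above) =====
theorem find_last_ob_py_spec : Claim_equal_find_last_ob_py := by
  intro lst _
  unfold Spec_find_last_ob_py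
  exact pv_eq lst
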